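-- pv_equiv track=rewrite | github.com/hywnj/CodingTest | Python/P133502.py | solution
-- ===== SOURCE A (Python) =====
-- def solution(ingredient):
--     answer = 0
--     stack = []
--
--     for idx in range(len(ingredient)):
--         stack.append(ingredient[idx])
--         if [1, 2, 3, 1] == stack[-4:]:
--             answer += 1
--             stack.pop()
--             stack.pop()
--             stack.pop()
--             stack.pop()
--
--     return answer
-- ===== SOURCE B (Python) =====
-- def _find(lst):
--     for i in range(len(lst)):
--         if lst[i:i + 4] == [1, 2, 3, 1]:
--             return i
--     return None
--
--
-- def solution(ingredient):
--     lst = list(ingredient)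
--     answer = 0
--     while True:
--         i = _find(lst)
--         if i is None:
--             return answer
--         lst = lst[:i] + lst[i + 4:]
--         answer += 1
-- ===== Notes on version B (the rewrite author's own statement) =====
-- stated objective: alternative
-- what changed: Replaces A's single-pass stack (push each ingredient, pop on a [1,2,3,1] suffix) with a repeated-rewriting strategy: scan for the leftmost [1,2,3,1] window, delete it, count, and rescan until no occurrence remains.
import Mathlib
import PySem

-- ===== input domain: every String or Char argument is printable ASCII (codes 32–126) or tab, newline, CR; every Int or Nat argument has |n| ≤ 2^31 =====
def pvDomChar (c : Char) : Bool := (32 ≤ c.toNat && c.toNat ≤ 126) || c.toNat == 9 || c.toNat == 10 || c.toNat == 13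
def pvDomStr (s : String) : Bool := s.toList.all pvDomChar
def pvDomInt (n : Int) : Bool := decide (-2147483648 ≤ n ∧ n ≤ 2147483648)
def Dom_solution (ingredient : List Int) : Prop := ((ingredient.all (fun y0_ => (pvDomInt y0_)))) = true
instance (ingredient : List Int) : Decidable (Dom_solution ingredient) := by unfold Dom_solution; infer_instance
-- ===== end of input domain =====

-- B repeatedly deletes the leftmost occurrence of [1,2,3,1] instead of running A's one-pass stack; same counts, different strategy.

-- ===== PORT A =====
-- one loop step of A: append ingredient[idx], check stack[-4:], count and pop 4 on a match
def stepA (st : List Int × Int) (x : Int) : List Int × Int :=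
  let s2 := st.1 ++ [x]
  if [1, 2, 3, 1] = PySem.List.slice s2 (some (-4)) none then
    (s2.dropLast.dropLast.dropLast.dropLast, st.2 + 1)
  else
    (s2, st.2)

def solution (ingredient : List Int) : Int :=
  (ingredient.foldl stepA ([], 0)).2

-- ===== PORT B =====
-- B's _find: index of the first occurrence of [1,2,3,1] (lst[i:i+4] == [1,2,3,1]), none if absent
def findOcc : List Int → Option Nat
  | [] => none
  | x :: rest =>
    if (x :: rest).take 4 = [1, 2, 3, 1] then some 0
    else (findOcc rest).map (· + 1)

-- needed by altLoop's termination: a found occurrence fits inside the list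
theorem findOcc_bound : ∀ {l : List Int} {i : Nat}, findOcc l = some i → i + 4 ≤ l.length := by
  intro l
  induction l with
  | nil => intro i h; simp [findOcc] at h
  | cons x rest ih =>
    intro i h
    simp only [findOcc] at h
    split at h
    · rename_i hc
      have hlen : (List.take 4 (x :: rest)).length = 4 := by rw [hc]; rfl
      have : i = 0 := by simpa using h.symm
      simp only [List.length_take] at hlen
      omega
    · simp only [Option.map_eq_some_iff] at h
      obtain ⟨j, hj, rfl⟩ := h
      have := ih hj
      simp only [List.length_cons]
      omega

-- B's while-loop: delete the found occurrence (lst[:i] + lst[i+4:]) and count, until none is found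
def altLoop (lst : List Int) (answer : Int) : Int :=
  match h : findOcc lst with
  | none => answer
  | some i => altLoop (lst.take i ++ lst.drop (i + 4)) (answer + 1)
termination_by lst.length
decreasing_by
  have := findOcc_bound h
  simp only [List.length_append, List.length_take, List.length_drop]
  omega

def solution_alt (ingredient : List Int) : Int :=
  altLoop ingredient 0

-- ===== PRECONDITION & SPEC =====
def Spec_solution (ingredient : List Int) (out : Int) : Prop := out = solution_alt ingredient
instance (ingredient : List Int) (out : Int) : Decidable (Spec_solution ingredient out) := by unfold Spec_solution; infer_instance

-- ===== CLAIM (what is proved, stated in full; the proofs are below) =====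
def Claim_equal_solution : Prop := ∀ (ingredient : List Int), Dom_solution ingredient → Spec_solution ingredient (solution ingredient)

-- ===== LEMMAS AND PROOFS =====

-- A's match test "[1,2,3,1] == stack[-4:]" holds iff [1,2,3,1] is a suffix of the stack
theorem match_iff_suffix (s : List Int) :
    ([1, 2, 3, 1] = PySem.List.slice s (some (-4)) none) ↔ [1, 2, 3, 1] <:+ s := by
  rw [PySem.List.slice_from_neg_ofNat s 4 (by omega)]
  constructor
  · intro h
    rw [h]
    exact List.drop_suffix _ _
  · rintro ⟨w, rfl⟩
    have hl : (w ++ [1, 2, 3, 1]).length - 4 = w.length := by simp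
    rw [hl, List.drop_left]

theorem stepA_no_match (s : List Int) (c : Int) (x : Int)
    (h : ¬ ([1, 2, 3, 1] <:+ s ++ [x])) : stepA (s, c) x = (s ++ [x], c) := by
  simp only [stepA]
  rw [if_neg]
  intro hm
  exact h ((match_iff_suffix _).mp hm)

-- a suffix [1,2,3,1] forces the last element to be 1
theorem no_match_concat (s : List Int) (x : Int) (hx : x ≠ 1) :
    ¬ ([1, 2, 3, 1] <:+ s ++ [x]) := by
  rintro ⟨w, hw⟩
  have h1 : ((w ++ [1, 2, 3]) ++ [1]).getLast? = (s ++ [x]).getLast? := by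
    rw [← hw]; simp
  simp only [List.getLast?_concat] at h1
  exact hx (Option.some.inj h1).symm

-- running A's loop over a pattern-free list from the empty stack just copies the list
theorem free_run (u : List Int) (h : ¬ ([1, 2, 3, 1] <:+: u)) :
    u.foldl stepA ([], 0) = (u, 0) := by
  induction u using List.reverseRecOn with
  | nil => rfl
  | append_singleton u x ih =>
    have hu : ¬ ([1, 2, 3, 1] <:+: u) := fun hi => h (hi.trans (List.prefix_append u [x]).isInfix)
    rw [List.foldl_append, ih hu, List.foldl_cons, List.foldl_nil]
    exact stepA_no_match u 0 x (fun hs => h hs.isInfix)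

-- the count component of A's loop is additive in its start value
theorem count_shift (v : List Int) : ∀ (s : List Int) (c : Int),
    v.foldl stepA (s, c) = ((v.foldl stepA (s, 0)).1, c + (v.foldl stepA (s, 0)).2) := by
  induction v with
  | nil => intro s c; simp
  | cons x v ih =>
    intro s c
    simp only [List.foldl_cons]
    have hstep : stepA (s, c) x = ((stepA (s, 0) x).1, c + (stepA (s, 0) x).2) := by
      by_cases hm : [1, 2, 3, 1] = PySem.List.slice (s ++ [x]) (some (-4)) none
      · simp [stepA, hm]
      · simp [stepA, hm]
    rw [hstep]
    obtain ⟨s1, d⟩ := stepA (s, 0) x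
    rw [ih s1 (c + d), ih s1 d]
    simp [add_assoc]

-- pushing 1,2,3,1 onto a stack not ending in [1,2,3] fires exactly the final match and restores the stack
theorem burger_step (u : List Int) (c : Int) (hu : ¬ ([1, 2, 3] <:+ u)) :
    [1, 2, 3, 1].foldl stepA (u, c) = (u, c + 1) := by
  have h1 : ¬ ([1, 2, 3, 1] <:+ u ++ [1]) := by
    rintro ⟨w, hw⟩
    apply hu
    refine ⟨w, ?_⟩
    have h2 : (w ++ [1, 2, 3]) ++ [1] = u ++ [1] := by simpa using hw
    exact List.append_cancel_right h2
  simp only [List.foldl_cons, List.foldl_nil]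
  rw [stepA_no_match u c 1 h1,
      stepA_no_match _ c 2 (no_match_concat _ 2 (by omega)),
      stepA_no_match _ c 3 (no_match_concat _ 3 (by omega))]
  simp only [stepA]
  rw [if_pos]
  · simp
  · exact (match_iff_suffix _).mpr ⟨u, by simp⟩

-- the core equation: deleting one clean leftmost burger costs A exactly one count
theorem main_split (u v : List Int) (hinf : ¬ ([1, 2, 3, 1] <:+: u))
    (hsuf : ¬ ([1, 2, 3] <:+ u)) :
    ((u ++ [1, 2, 3, 1] ++ v).foldl stepA ([], 0)).2
      = 1 + ((u ++ v).foldl stepA ([], 0)).2 := by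
  rw [List.foldl_append, List.foldl_append, free_run u hinf, List.foldl_append, free_run u hinf,
      burger_step u 0 hsuf]
  rw [count_shift v u (0 + 1), count_shift v u 0]
  simp

-- findOcc = none means no window equals the pattern
theorem findOcc_none (l : List Int) (h : findOcc l = none) :
    ∀ j, (l.drop j).take 4 ≠ [1, 2, 3, 1] := by
  induction l with
  | nil => intro j hj; simp at hj
  | cons x rest ih =>
    simp only [findOcc] at h
    split at h
    · exact absurd h (by simp)
    · rename_i hc
      have hrest : findOcc rest = none := by
        cases hr : findOcc rest <;> simp [hr] at h ⊢
      intro j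
      cases j with
      | zero => simpa using hc
      | succ j => simpa using ih hrest j

-- findOcc = some i means a match at i and none strictly before
theorem findOcc_some (l : List Int) (i : Nat) (h : findOcc l = some i) :
    (l.drop i).take 4 = [1, 2, 3, 1] ∧ ∀ j < i, (l.drop j).take 4 ≠ [1, 2, 3, 1] := by
  induction l generalizing i with
  | nil => simp [findOcc] at h
  | cons x rest ih =>
    simp only [findOcc] at h
    split at h
    · rename_i hc
      have : i = 0 := by simpa using h.symm
      subst this
      exact ⟨by simpa using hc, by omega⟩
    · rename_i hc
      simp only [Option.map_eq_some_iff] at h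
      obtain ⟨k, hk, rfl⟩ := h
      obtain ⟨h1, h2⟩ := ih k hk
      refine ⟨by simpa using h1, ?_⟩
      intro j hj
      cases j with
      | zero => simpa using hc
      | succ j => simpa using h2 j (by omega)

-- an infix occurrence of the pattern yields a window equal to it
theorem infix_window (l : List Int) (h : [1, 2, 3, 1] <:+: l) :
    ∃ j, (l.drop j).take 4 = [1, 2, 3, 1] := by
  obtain ⟨a, b, rfl⟩ := h
  refine ⟨a.length, ?_⟩
  rw [List.append_assoc, List.drop_left]
  rfl

-- a window inside the prefix before the first occurrence contradicts minimality
theorem take_window (l : List Int) (i j : Nat)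
    (h : ((l.take i).drop j).take 4 = [1, 2, 3, 1]) :
    (l.drop j).take 4 = [1, 2, 3, 1] ∧ j + 4 ≤ i := by
  rw [List.drop_take] at h
  have hlen : (((l.drop j).take (i - j)).take 4).length = 4 := by rw [h]; rfl
  simp only [List.length_take, List.length_drop] at hlen
  rw [List.take_take] at h
  have h4 : min 4 (i - j) = 4 := by omega
  rw [h4] at h
  exact ⟨h, by omega⟩

theorem altLoop_none {lst : List Int} {ans : Int} (h : findOcc lst = none) :
    altLoop lst ans = ans := by
  rw [altLoop]
  split
  · rfl
  · rename_i i hi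
    rw [h] at hi
    cases hi

theorem altLoop_some {lst : List Int} {i : Nat} {ans : Int} (h : findOcc lst = some i) :
    altLoop lst ans = altLoop (lst.take i ++ lst.drop (i + 4)) (ans + 1) := by
  rw [altLoop]
  split
  · rename_i hi
    rw [h] at hi
    cases hi
  · rename_i j hj
    rw [h] at hj
    cases hj
    rfl

-- B's loop from any start count adds exactly A's answer
theorem altLoop_eq (lst : List Int) (answer : Int) :
    altLoop lst answer = answer + solution lst := by
  induction lst, answer using altLoop.induct with
  | case1 lst answer h =>
    rw [altLoop_none h]
    have hno : ¬ ([1, 2, 3, 1] <:+: lst) := by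
      intro hin
      obtain ⟨j, hj⟩ := infix_window lst hin
      exact findOcc_none lst h j hj
    simp [solution, free_run lst hno]
  | case2 lst answer i h ih =>
    rw [altLoop_some h]
    obtain ⟨hmatch, hfirst⟩ := findOcc_some lst i h
    have hb := findOcc_bound h
    -- decompose lst = u ++ [1,2,3,1] ++ v
    set u := lst.take i with hu
    set v := lst.drop (i + 4) with hv
    have hlenu : u.length = i := by
      rw [hu, List.length_take]; omega
    have hdec : lst = u ++ [1, 2, 3, 1] ++ v := by
      have h1 : lst.drop i = [1, 2, 3, 1] ++ v := by
        conv_lhs => rw [← List.take_append_drop 4 (lst.drop i)]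
        rw [hmatch, hv, List.drop_drop]
      conv_lhs => rw [← List.take_append_drop i lst]
      rw [h1, hu, List.append_assoc]
    have hinf : ¬ ([1, 2, 3, 1] <:+: u) := by
      intro hin
      obtain ⟨j, hj⟩ := infix_window u hin
      obtain ⟨hw, hji⟩ := take_window lst i j hj
      exact hfirst j (by omega) hw
    have hsuf : ¬ ([1, 2, 3] <:+ u) := by
      rintro ⟨w, hw⟩
      have hlen3 : w.length + 3 = i := by
        have h3 : (w ++ [1, 2, 3]).length = i := by rw [hw, hlenu]
        simpa using h3
      have hlw : w.length = i - 3 := by omega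
      have hi3 : 3 ≤ i := by omega
      apply hfirst (i - 3) (by omega)
      have hdropu : u.drop (i - 3) = [1, 2, 3] := by
        rw [← hw, ← hlw, List.drop_left]
      have : lst.drop (i - 3) = [1, 2, 3] ++ ([1, 2, 3, 1] ++ v) := by
        conv_lhs => rw [hdec]
        rw [List.append_assoc] at hdec ⊢
        rw [List.drop_append_of_le_length (by omega), hdropu]
      rw [this]
      rfl
    rw [ih]
    have hcore : solution lst = 1 + solution (u ++ v) := by
      simp only [solution]
      conv_lhs => rw [hdec]
      exact main_split u v hinf hsuf
    rw [hcore]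
    ring

-- ===== VERDICT (by name: the statement is the Claim_ definition above) =====
theorem solution_spec : Claim_equal_solution := by
  intro ingredient _
  unfold Spec_solution solution_alt
  rw [altLoop_eq]
  ring
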